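-- pv_equiv track=rewrite | github.com/yeojeong735/coding_test | 프로그래머스/1/132267. 콜라 문제/콜라 문제.py | solution
-- ===== SOURCE A (Python) =====
-- def solution(a, b, n):
--
--     answer = 0
--
--     while n >= a:
--         new_cok = (n // a) * b
--
--         empty_cok = n % a
--
--         answer += new_cok
--
--         n = empty_cok + new_cok
--     return answer
-- ===== SOURCE B (Python) =====
-- def solution(a, b, n):
--     if n < a:
--         return 0
--     return (n - b) // (a - b) * b
-- ===== Notes on version B (the rewrite author's own statement) =====
-- stated objective: simpler
-- what changed: Replaced A's while-loop simulation of repeated bottle exchanges with the closed-form count (n-b)//(a-b)*b (0 when n<a).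
-- outside the precondition, e.g. on solution(3, -2, 7): A returns -4, B returns -2
import Mathlib
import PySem

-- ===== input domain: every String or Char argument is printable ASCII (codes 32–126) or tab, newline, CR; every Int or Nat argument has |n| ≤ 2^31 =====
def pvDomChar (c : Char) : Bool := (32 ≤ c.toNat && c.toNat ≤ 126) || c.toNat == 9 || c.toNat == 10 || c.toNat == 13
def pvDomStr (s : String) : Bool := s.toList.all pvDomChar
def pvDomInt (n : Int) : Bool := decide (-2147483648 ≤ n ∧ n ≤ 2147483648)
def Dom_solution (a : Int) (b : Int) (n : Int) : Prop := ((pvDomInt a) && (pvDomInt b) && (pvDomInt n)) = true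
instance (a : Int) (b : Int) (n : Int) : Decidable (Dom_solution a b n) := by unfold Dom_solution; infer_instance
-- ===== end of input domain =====

-- B replaces A's iterative simulation of the bottle exchanges by the closed-form
-- count (n-b)//(a-b)*b: a two-line formula instead of a loop (objective: simpler).

-- ===== PORT A =====
-- A's while-loop, with fuel n.toNat+1; inside Pre_ the loop runs at most n.toNat
-- iterations (n drops by ≥ a-b ≥ 1 each step), so the fuel is never exhausted.
def solutionLoop (a : Int) (b : Int) : Nat → Int → Int → Int
  | 0, answer, _ => answer
  | f + 1, answer, n =>
    if n ≥ a then
      let new_cok := (PySem.Int.floordiv n a) * b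
      let empty_cok := PySem.Int.mod n a
      solutionLoop a b f (answer + new_cok) (empty_cok + new_cok)
    else answer

def solution (a : Int) (b : Int) (n : Int) : Int :=
  solutionLoop a b (n.toNat + 1) 0 n

-- ===== PORT B =====
def solution_alt (a : Int) (b : Int) (n : Int) : Int :=
  if n < a then 0 else PySem.Int.floordiv (n - b) (a - b) * b

-- ===== PRECONDITION & SPEC =====
-- Pre_ restricts to the problem's natural domain (0 ≤ b < a; any n) plus all
-- inputs where the loop never runs (n < a): for negative b with n ≥ a A's loop
-- either diverges or returns a meaningless negative count the closed form does
-- not (and should not) reproduce, and for b ≥ a ≥ 1 (or a ≤ 0 ≤ n) A diverges.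
def Pre_solution (a : Int) (b : Int) (n : Int) : Prop := n < a ∨ (0 ≤ b ∧ b < a)
instance (a : Int) (b : Int) (n : Int) : Decidable (Pre_solution a b n) := by
  unfold Pre_solution; infer_instance

def pvWitness_solution : Int × Int × Int := (3, 1, 20)

def Spec_solution (a : Int) (b : Int) (n : Int) (out : Int) : Prop := out = solution_alt a b n
instance (a : Int) (b : Int) (n : Int) (out : Int) : Decidable (Spec_solution a b n out) := by unfold Spec_solution; infer_instance

-- ===== CLAIM (what is proved, stated in full; the proofs are below) =====
def Claim_equal_solution : Prop := ∀ (a : Int) (b : Int) (n : Int), Dom_solution a b n → Pre_solution a b n → Spec_solution a b n (solution a b n)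

-- ===== LEMMAS AND PROOFS =====

-- closed form for the remaining bonus, as B computes it
def bonus (a : Int) (b : Int) (n : Int) : Int :=
  if n < a then 0 else PySem.Int.floordiv (n - b) (a - b) * b

-- For a positive divisor, Python's floor division is Euclidean division.
theorem floordiv_pos_eq_ediv (x d : Int) (hd : 0 < d) :
    PySem.Int.floordiv x d = x / d := by
  unfold PySem.Int.floordiv
  rw [Int.fdiv_eq_ediv_of_nonneg x (le_of_lt hd)]

-- one loop step preserves the closed form
theorem bonus_step (a b n : Int) (hb : 0 ≤ b) (hba : b < a) (hn : a ≤ n) :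
    bonus a b n =
      (PySem.Int.floordiv n a) * b +
        bonus a b (PySem.Int.mod n a + (PySem.Int.floordiv n a) * b) := by
  have ha : (0:Int) < a := lt_of_le_of_lt hb hba
  have hd : (0:Int) < a - b := by omega
  set q := PySem.Int.floordiv n a with hq
  set r := PySem.Int.mod n a with hr
  have hqe : q = n / a := floordiv_pos_eq_ediv n a ha
  have hre : r = n % a := by
    unfold PySem.Int.mod at hr
    rw [hr, Int.fmod_eq_emod_of_nonneg _ (le_of_lt ha)]
  have hnr : n = a * q + r := by rw [hqe, hre]; exact (Int.ediv_add_emod n a).symm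
  have hr0 : 0 ≤ r := hre ▸ Int.emod_nonneg n (ne_of_gt ha)
  have hra : r < a := hre ▸ Int.emod_lt_of_pos n ha
  have hq1 : 1 ≤ q := by
    rw [hqe]; exact (Int.le_ediv_iff_mul_le ha).mpr (by omega)
  -- n - b = (a-b)*q + ((r + q*b) - b)
  have hsplit : n - b = (r + q * b - b) + (a - b) * q := by rw [hnr]; ring
  by_cases hnext : r + q * b < a
  · -- next value leaves the loop: bonus of next is 0, and (n-b)/(a-b) = q
    have hnb : 0 ≤ r + q * b - b := by nlinarith
    have : PySem.Int.floordiv (n - b) (a - b) = q := by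
      rw [floordiv_pos_eq_ediv _ _ hd, hsplit, Int.add_mul_ediv_left _ _ (ne_of_gt hd),
        Int.ediv_eq_zero_of_lt hnb (by omega)]
      omega
    simp only [bonus, if_neg (by omega : ¬ n < a), if_pos hnext, this]
    ring
  · -- loop continues
    have : PySem.Int.floordiv (n - b) (a - b)
        = q + PySem.Int.floordiv (r + q * b - b) (a - b) := by
      rw [floordiv_pos_eq_ediv _ _ hd, floordiv_pos_eq_ediv _ _ hd, hsplit,
        Int.add_mul_ediv_left _ _ (ne_of_gt hd)]
      omega
    simp only [bonus, if_neg (by omega : ¬ n < a), if_neg (by omega : ¬ r + q * b < a), this]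
    ring

-- the loop computes answer + bonus, given enough fuel
theorem solutionLoop_eq (a b : Int) (hb : 0 ≤ b) (hba : b < a) :
    ∀ (f : Nat) (answer n : Int), n < (f : Int) →
      solutionLoop a b f answer n = answer + bonus a b n := by
  intro f
  induction f with
  | zero =>
    intro answer n hn
    have : n < a := by omega
    simp [solutionLoop, bonus, if_pos this]
  | succ f ih =>
    intro answer n hn
    by_cases h : n ≥ a
    · have ha : (0:Int) < a := lt_of_le_of_lt hb hba
      have hqe : PySem.Int.floordiv n a = n / a := floordiv_pos_eq_ediv n a ha
      have hre : PySem.Int.mod n a = n % a := by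
        unfold PySem.Int.mod
        rw [Int.fmod_eq_emod_of_nonneg _ (le_of_lt ha)]
      have hq1 : 1 ≤ n / a := (Int.le_ediv_iff_mul_le ha).mpr (by omega)
      -- next n is strictly smaller: n' = n - (n/a)*(a-b) ≤ n - (a-b) ≤ n - 1
      have hdec : PySem.Int.mod n a + (PySem.Int.floordiv n a) * b < n := by
        rw [hqe, hre]
        have hmod : n % a = n - a * (n / a) := by
          have := Int.ediv_add_emod n a; omega
        rw [hmod]
        nlinarith [hq1, hba]
      rw [solutionLoop, if_pos h, ih _ _ (by omega),
        bonus_step a b n hb hba h]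
      ring
    · rw [solutionLoop, if_neg h]
      simp [bonus, if_pos (by omega : n < a)]

-- ===== VERDICT (by name: the statement is the Claim_ definition above) =====
theorem solution_spec : Claim_equal_solution := by
  intro a b n _ hpre
  unfold Spec_solution solution solution_alt
  rcases hpre with hna | ⟨hb, hba⟩
  · -- loop body never runs
    rw [solutionLoop, if_neg (by omega)]
    rw [if_pos hna]
  · have hfuel : n < ((n.toNat + 1 : Nat) : Int) := by
      push_cast; omega
    rw [solutionLoop_eq a b hb hba _ 0 n hfuel]
    simp [bonus]
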